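-- pv_equiv track=rewrite | github.com/dannyvi/Kandinsky | glprocedures.py | CoerceNum
-- ===== SOURCE A (Python) =====
-- def CoerceNum(var,num,lower,higher):
--     var+=num
--     while var<lower or var>=higher:
--         if var<lower:
--             var+=higher-lower
--         elif var>=higher:
--             var-=higher-lower
--     return var
-- ===== SOURCE B (Python) =====
-- def CoerceNum(var, num, lower, higher):
--     return lower + (var + num - lower) % (higher - lower)
-- ===== Notes on version B (the rewrite author's own statement) =====
-- stated objective: simpler
-- what changed: Replaced the step-by-step while loop that repeatedly adds/subtracts the range width with a single closed-form modular-arithmetic expression lower + (var+num-lower) % (higher-lower).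
import Mathlib
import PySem

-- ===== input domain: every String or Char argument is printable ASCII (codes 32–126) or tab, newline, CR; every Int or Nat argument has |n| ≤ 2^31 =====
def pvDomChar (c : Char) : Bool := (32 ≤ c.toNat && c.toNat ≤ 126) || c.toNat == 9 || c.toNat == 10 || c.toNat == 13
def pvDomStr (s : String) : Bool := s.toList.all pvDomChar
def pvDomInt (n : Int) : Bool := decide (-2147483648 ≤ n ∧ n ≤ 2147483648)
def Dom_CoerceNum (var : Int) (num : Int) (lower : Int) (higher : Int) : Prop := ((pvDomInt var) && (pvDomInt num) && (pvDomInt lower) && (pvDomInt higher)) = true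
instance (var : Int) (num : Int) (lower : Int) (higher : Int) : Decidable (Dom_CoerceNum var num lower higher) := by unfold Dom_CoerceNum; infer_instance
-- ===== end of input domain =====

-- B replaces A's step-by-step wrap-around while loop by one closed-form modular-arithmetic expression (simpler: a one-line formula instead of a loop).


-- ===== PORT A =====
-- the while loop of A; the 'lower < higher' guard only totalizes it (Python diverges otherwise, excluded by Pre_)
def coerceLoopA (lower : Int) (higher : Int) (v : Int) : Int :=
  if _h : lower < higher then
    if v < lower then coerceLoopA lower higher (v + (higher - lower))
    else if v ≥ higher then coerceLoopA lower higher (v - (higher - lower))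
    else v
  else v
termination_by (if v < lower then lower - v else if v ≥ higher then v - higher + 1 else 0).toNat
decreasing_by all_goals (split_ifs <;> omega)

def CoerceNum (var : Int) (num : Int) (lower : Int) (higher : Int) : Int :=
  coerceLoopA lower higher (var + num)

-- ===== PORT B =====
def CoerceNum_alt (var : Int) (num : Int) (lower : Int) (higher : Int) : Int :=
  lower + PySem.Int.mod (var + num - lower) (higher - lower)

-- ===== PRECONDITION & SPEC =====
-- Pre_ excludes lower ≥ higher, where A never returns: its while loop diverges (B raises ZeroDivisionError when lower = higher).
def Pre_CoerceNum (var : Int) (num : Int) (lower : Int) (higher : Int) : Prop := lower < higher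
instance (var : Int) (num : Int) (lower : Int) (higher : Int) : Decidable (Pre_CoerceNum var num lower higher) := by unfold Pre_CoerceNum; infer_instance
def pvWitness_CoerceNum : Int × Int × Int × Int := (7, 12, 0, 5)

def Spec_CoerceNum (var : Int) (num : Int) (lower : Int) (higher : Int) (out : Int) : Prop := out = CoerceNum_alt var num lower higher
instance (var : Int) (num : Int) (lower : Int) (higher : Int) (out : Int) : Decidable (Spec_CoerceNum var num lower higher out) := by unfold Spec_CoerceNum; infer_instance

-- ===== CLAIM (what is proved, stated in full; the proofs are below) =====
def Claim_equal_CoerceNum : Prop := ∀ (var : Int) (num : Int) (lower : Int) (higher : Int), Dom_CoerceNum var num lower higher → Pre_CoerceNum var num lower higher → Spec_CoerceNum var num lower higher (CoerceNum var num lower higher)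

-- ===== LEMMAS AND PROOFS =====
theorem coerceLoopA_eq_mod (lower higher v : Int) (h : lower < higher) :
    coerceLoopA lower higher v = lower + (v - lower) % (higher - lower) := by
  fun_induction coerceLoopA lower higher v with
  | case1 v _ hlt ih =>
      rw [ih, show v + (higher - lower) - lower = (v - lower) + (higher - lower) by ring,
        Int.add_emod_right]
  | case2 v _ hlt hge ih =>
      rw [ih, show v - (higher - lower) - lower = (v - lower) - (higher - lower) by ring,
        Int.sub_emod_right]
  | case3 v _ hlt hge => rw [Int.emod_eq_of_lt (by omega) (by omega)]; omega
  | case4 v hcon => exact absurd h hcon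

theorem CoerceNum_spec : Claim_equal_CoerceNum := by
  intro var num lower higher _ hpre
  have hlt : lower < higher := hpre
  unfold Spec_CoerceNum CoerceNum CoerceNum_alt
  rw [coerceLoopA_eq_mod _ _ _ hlt, PySem.Int.mod_eq_emod_of_pos (by omega)]
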